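-- pv_equiv track=rewrite | github.com/AragonD19/Dise-o-de-Lenguajes | LabC.py | separar_palabra
-- ===== SOURCE A (Python) =====
-- def separar_palabra(palabra, simbolos_a_separar):
--     partes = []
--     parte_actual = ''
--     dentro_de_casa = False
--     casa_actual = ''
--
--     for caracter in palabra:
--         if dentro_de_casa:
--             if caracter == "'":
--                 dentro_de_casa = False
--                 parte_actual += casa_actual + "'"
--                 casa_actual = ''
--                 partes.append(parte_actual)
--                 parte_actual = ''
--             else:
--                 casa_actual += caracter
--         elif caracter in simbolos_a_separar:
--             if parte_actual:
--                 partes.append(parte_actual)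
--                 parte_actual = ''
--             partes.append(caracter)
--         elif caracter == '(':
--             if parte_actual:
--                 partes.append(parte_actual)
--                 parte_actual = ''
--             partes.append(caracter)
--         elif caracter == ')':
--             if parte_actual:
--                 partes.append(parte_actual)
--                 parte_actual = ''
--             partes.append(caracter)
--         elif caracter == "'":
--             dentro_de_casa = True
--             parte_actual += caracter
--         else:
--             parte_actual += caracter
--
--     if parte_actual:
--         partes.append(parte_actual)
--     return partes
-- ===== SOURCE B (Python) =====
-- def separar_palabra(palabra, simbolos_a_separar):
--     partes = []
--     parte_actual = ''
--     i = 0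
--     n = len(palabra)
--     while i < n:
--         c = palabra[i]
--         if c in simbolos_a_separar or c == '(' or c == ')':
--             if parte_actual:
--                 partes.append(parte_actual)
--                 parte_actual = ''
--             partes.append(c)
--             i += 1
--         elif c == "'":
--             j = palabra.find("'", i + 1)
--             if j == -1:
--                 parte_actual += "'"
--                 break
--             partes.append(parte_actual + palabra[i:j + 1])
--             parte_actual = ''
--             i = j + 1
--         else:
--             parte_actual += c
--             i += 1
--     if parte_actual:
--         partes.append(parte_actual)
--     return partes
-- ===== Notes on version B (the rewrite author's own statement) =====
-- stated objective: simpler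
-- what changed: Replaces A's four-variable state machine (dentro_de_casa/casa_actual flags carried through every character) with an index-based scan that resolves each quoted region in one step via str.find and a slice, so no quote-mode state survives across iterations.
import Mathlib
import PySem

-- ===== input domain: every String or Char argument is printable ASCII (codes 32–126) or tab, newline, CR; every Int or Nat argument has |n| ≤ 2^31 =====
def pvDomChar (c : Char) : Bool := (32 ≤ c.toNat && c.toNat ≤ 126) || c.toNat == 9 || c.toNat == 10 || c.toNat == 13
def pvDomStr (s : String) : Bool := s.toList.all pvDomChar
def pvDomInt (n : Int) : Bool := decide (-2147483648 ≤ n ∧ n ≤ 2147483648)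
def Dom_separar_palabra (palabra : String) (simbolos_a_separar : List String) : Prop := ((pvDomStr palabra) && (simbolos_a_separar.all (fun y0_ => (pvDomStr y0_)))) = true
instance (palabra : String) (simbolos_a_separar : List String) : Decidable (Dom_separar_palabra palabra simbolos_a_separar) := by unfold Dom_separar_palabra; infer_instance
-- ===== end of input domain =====

-- B rewrites A's four-variable character state machine as an index-free scan that resolves a
-- whole quoted region in one step (Python: str.find + slice); objective: simpler.

-- ===== PORT A =====
-- state: (partes, parte_actual, dentro_de_casa, casa_actual); tokens built as List Char
def sepAStep (simbolos : List String)
    (s : List String × List Char × Bool × List Char) (c : Char) :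
    List String × List Char × Bool × List Char :=
  let (partes, parte, dentro, casa) := s
  if dentro then
    if c = '\'' then
      (partes ++ [String.mk (parte ++ casa ++ ['\''])], [], false, [])
    else
      (partes, parte, true, casa ++ [c])
  else if String.mk [c] ∈ simbolos then
    (partes ++ (if parte ≠ [] then [String.mk parte] else []) ++ [String.mk [c]], [], false, [])
  else if c = '(' then
    (partes ++ (if parte ≠ [] then [String.mk parte] else []) ++ [String.mk [c]], [], false, [])
  else if c = ')' then
    (partes ++ (if parte ≠ [] then [String.mk parte] else []) ++ [String.mk [c]], [], false, [])
  else if c = '\'' then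
    (partes, parte ++ [c], true, casa)
  else
    (partes, parte ++ [c], false, casa)

def separar_palabra (palabra : String) (simbolos_a_separar : List String) : List String :=
  let s := palabra.toList.foldl (sepAStep simbolos_a_separar) ([], [], false, [])
  let (partes, parte, _, _) := s
  partes ++ (if parte ≠ [] then [String.mk parte] else [])

-- ===== PORT B =====
-- Python B's `palabra.find("'", i+1)` + slice `palabra[i:j+1]`, ported exactly as a split of the
-- remaining characters at the first quote: none = find returned -1.
def sepBFindQ : List Char → Option (List Char × List Char)
  | [] => none
  | c :: rest =>
    if c = '\'' then some ([], rest)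
    else (sepBFindQ rest).map (fun p => (c :: p.1, p.2))

theorem sepBFindQ_shrink : ∀ (l a b : List Char), sepBFindQ l = some (a, b) → b.length < l.length := by
  intro l
  induction l with
  | nil => intro a b h; simp [sepBFindQ] at h
  | cons c rest ih =>
    intro a b h
    simp only [sepBFindQ] at h
    split at h
    · simp at h
      simp [h.2]
    · cases hr : sepBFindQ rest with
      | none => rw [hr] at h; simp at h
      | some p =>
        rw [hr] at h; simp at h
        have := ih p.1 p.2 (by rw [hr])
        have hb : b = p.2 := h.2.symm
        simp only [hb, List.length_cons]
        omega

def sepBLoop (simbolos : List String) : List Char → List String → List Char → List String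
  | [], partes, parte => partes ++ (if parte ≠ [] then [String.mk parte] else [])
  | c :: rest, partes, parte =>
    if String.mk [c] ∈ simbolos ∨ c = '(' ∨ c = ')' then
      sepBLoop simbolos rest
        (partes ++ (if parte ≠ [] then [String.mk parte] else []) ++ [String.mk [c]]) []
    else if c = '\'' then
      match h : sepBFindQ rest with
      | none =>
        -- unterminated quote: take the quote, discard the rest (Python: break)
        let parte' := parte ++ ['\'']
        partes ++ (if parte' ≠ [] then [String.mk parte'] else [])
      | some (inside, rest') =>
        sepBLoop simbolos rest'
          (partes ++ [String.mk (parte ++ ['\''] ++ inside ++ ['\''])]) []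
    else
      sepBLoop simbolos rest partes (parte ++ [c])
  termination_by cs _ _ => cs.length
  decreasing_by
  · simp
  · have := sepBFindQ_shrink rest inside rest' h
    simp; omega
  · simp

def separar_palabra_alt (palabra : String) (simbolos_a_separar : List String) : List String :=
  sepBLoop simbolos_a_separar palabra.toList [] []

-- ===== PRECONDITION & SPEC =====
def Spec_separar_palabra (palabra : String) (simbolos_a_separar : List String) (out : List String) : Prop := out = separar_palabra_alt palabra simbolos_a_separar
instance (palabra : String) (simbolos_a_separar : List String) (out : List String) : Decidable (Spec_separar_palabra palabra simbolos_a_separar out) := by unfold Spec_separar_palabra; infer_instance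

-- ===== CLAIM (what is proved, stated in full; the proofs are below) =====
def Claim_equal_separar_palabra : Prop := ∀ (palabra : String) (simbolos_a_separar : List String), Dom_separar_palabra palabra simbolos_a_separar → Spec_separar_palabra palabra simbolos_a_separar (separar_palabra palabra simbolos_a_separar)

-- ===== LEMMAS AND PROOFS =====

def sepAFlush (s : List String × List Char × Bool × List Char) : List String :=
  s.1 ++ (if s.2.1 ≠ [] then [String.mk s.2.1] else [])

-- A's loop while dentro_de_casa: it scans to the first quote (or the end, discarding casa)
theorem sepA_dentro (simbolos : List String) :
    ∀ (cs : List Char) (partes : List String) (parte casa : List Char),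
      sepAFlush (cs.foldl (sepAStep simbolos) (partes, parte, true, casa)) =
        match sepBFindQ cs with
        | none => partes ++ (if parte ≠ [] then [String.mk parte] else [])
        | some (ins, rest) =>
            sepAFlush (rest.foldl (sepAStep simbolos)
              (partes ++ [String.mk (parte ++ casa ++ ins ++ ['\''])], [], false, [])) := by
  intro cs
  induction cs with
  | nil => intro partes parte casa; simp [sepBFindQ, sepAFlush]
  | cons c rest ih =>
    intro partes parte casa
    by_cases hc : c = '\''
    · subst hc
      simp [List.foldl, sepAStep, sepBFindQ]
    · rw [show (c :: rest).foldl (sepAStep simbolos) (partes, parte, true, casa)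
          = rest.foldl (sepAStep simbolos) (partes, parte, true, casa ++ [c]) by
        simp [List.foldl, sepAStep, hc]]
      rw [ih partes parte (casa ++ [c])]
      simp only [sepBFindQ, if_neg hc]
      cases hr : sepBFindQ rest with
      | none => simp
      | some p => cases p with
        | mk a b => simp

-- the main correspondence, by strong induction on the length of the remaining characters
theorem sepA_main (simbolos : List String) :
    ∀ (n : Nat) (cs : List Char), cs.length ≤ n → ∀ (partes : List String) (parte : List Char),
      sepAFlush (cs.foldl (sepAStep simbolos) (partes, parte, false, [])) =
        sepBLoop simbolos cs partes parte := by
  intro n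
  induction n with
  | zero =>
    intro cs hlen partes parte
    have : cs = [] := List.eq_nil_of_length_eq_zero (Nat.le_zero.mp hlen)
    subst this
    simp [sepBLoop, sepAFlush]
  | succ n ih =>
    intro cs hlen partes parte
    cases cs with
    | nil => simp [sepBLoop, sepAFlush]
    | cons c rest =>
      simp only [List.length_cons, Nat.succ_le_succ_iff] at hlen
      by_cases hsep : String.mk [c] ∈ simbolos
      · rw [show (c :: rest).foldl (sepAStep simbolos) (partes, parte, false, [])
            = rest.foldl (sepAStep simbolos)
                (partes ++ (if parte ≠ [] then [String.mk parte] else []) ++ [String.mk [c]],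
                 [], false, []) by simp [List.foldl, sepAStep, hsep]]
        rw [sepBLoop, if_pos (Or.inl hsep)]
        exact ih rest hlen _ []
      · by_cases hpar : c = '(' ∨ c = ')'
        · have hstep : (c :: rest).foldl (sepAStep simbolos) (partes, parte, false, [])
              = rest.foldl (sepAStep simbolos)
                  (partes ++ (if parte ≠ [] then [String.mk parte] else []) ++ [String.mk [c]],
                   [], false, []) := by
            rcases hpar with h | h <;> subst h <;> simp [List.foldl, sepAStep, hsep]
          rw [hstep, sepBLoop, if_pos (Or.inr hpar)]
          exact ih rest hlen _ []
        · push_neg at hpar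
          by_cases hq : c = '\''
          · subst hq
            rw [show ('\'' :: rest).foldl (sepAStep simbolos) (partes, parte, false, [])
                = rest.foldl (sepAStep simbolos) (partes, parte ++ ['\''], true, []) by
              simp [List.foldl, sepAStep, hsep, hpar.1, hpar.2]]
            rw [sepA_dentro simbolos rest partes (parte ++ ['\'']) []]
            have hcond : ¬(String.mk ['\''] ∈ simbolos ∨ '\'' = '(' ∨ '\'' = ')') := by
              rintro (h | h | h); exacts [hsep h, hpar.1 h, hpar.2 h]
            rw [sepBLoop, if_neg hcond, if_pos rfl]
            cases hr : sepBFindQ rest with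
            | none => simp [hr]
            | some p =>
              cases p with
              | mk ins rest' =>
                have hlt := sepBFindQ_shrink rest ins rest' hr
                have := ih rest' (by omega)
                  (partes ++ [String.mk (parte ++ ['\''] ++ ins ++ ['\''])]) []
                simpa [hr] using this
          · rw [show (c :: rest).foldl (sepAStep simbolos) (partes, parte, false, [])
                = rest.foldl (sepAStep simbolos) (partes, parte ++ [c], false, []) by
              simp [List.foldl, sepAStep, hsep, hpar.1, hpar.2, hq]]
            have hcond : ¬(String.mk [c] ∈ simbolos ∨ c = '(' ∨ c = ')') := by
              rintro (h | h | h); exacts [hsep h, hpar.1 h, hpar.2 h]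
            rw [sepBLoop, if_neg hcond, if_neg hq]
            exact ih rest hlen partes (parte ++ [c])

-- ===== VERDICT (by name: the statement is the Claim_ definition above) =====
theorem separar_palabra_spec : Claim_equal_separar_palabra := by
  intro palabra simbolos _
  unfold Spec_separar_palabra separar_palabra separar_palabra_alt
  have := sepA_main simbolos palabra.toList.length palabra.toList le_rfl [] []
  simpa [sepAFlush] using this
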